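-- pv_equiv track=rewrite | github.com/dinesh-n-06/CP-SUBS | CodeChef/Contests/187/Chococut.py | solution
-- ===== SOURCE A (Python) =====
-- def solution(n, m, k):
--     ans = 0
--     total = n * m
--     if total <=k: return 0
--     if k ==0 : return total
--     for i in range(1,n+1):
--         pa = m*i
--         pb= (n-i)*m
--         if pa>=k: ans= max(ans, pb)
--         if pb>=k: ans= max(ans, pa)
--     for i in range(1,m+1):
--         pa = n*i
--         pb= (m-i)*n
--         if pa>=k: ans= max(ans, pb)
--         if pb>=k: ans= max(ans, pa)
--     return ans
-- ===== SOURCE B (Python) =====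
-- def piece(N, M, k):
--     # Largest remaining piece after cutting off the fewest rows of width M
--     # whose cells reach k; 0 if no such cut exists in this orientation.
--     if M <= 0:
--         return 0
--     cuts = max(0, -(-k // M))          # ceil(k / M), at least 0
--     return M * (N - cuts) if cuts <= N else 0
--
--
-- def solution(n, m, k):
--     total = n * m
--     if total <= k:
--         return 0
--     if k == 0:
--         return total
--     return max(0, piece(n, m, k), piece(m, n, k))
-- ===== Notes on version B (the rewrite author's own statement) =====
-- stated objective: faster
-- what changed: A scans all n+m candidate cut positions in two loops; B computes, for each of the two orientations, the fewest rows needed to reach k by one ceiling division and takes the remaining piece, making it O(1).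
import Mathlib
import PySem

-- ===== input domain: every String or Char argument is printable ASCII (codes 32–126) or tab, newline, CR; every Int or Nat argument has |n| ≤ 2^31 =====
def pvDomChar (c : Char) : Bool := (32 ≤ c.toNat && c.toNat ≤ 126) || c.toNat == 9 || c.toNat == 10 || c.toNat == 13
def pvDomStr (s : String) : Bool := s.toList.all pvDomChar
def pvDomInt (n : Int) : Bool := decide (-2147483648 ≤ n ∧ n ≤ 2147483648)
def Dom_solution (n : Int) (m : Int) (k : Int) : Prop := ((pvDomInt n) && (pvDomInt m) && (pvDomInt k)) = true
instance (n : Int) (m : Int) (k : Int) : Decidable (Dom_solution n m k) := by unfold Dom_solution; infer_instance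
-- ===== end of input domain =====

-- B replaces A's two O(n)+O(m) scans by an O(1) closed form: for each orientation the
-- fewest rows reaching k is one ceiling division and the remaining piece is read off.

-- ===== PORT A =====
-- A's two for-loops are the same loop body with (n,m) swapped; pvStep/pvLoop transcribe that body once.
def pvStep (N : Int) (M : Int) (k : Int) (ans : Int) (i : Int) : Int :=
  let pa := M * i
  let pb := (N - i) * M
  let ans1 := if pa ≥ k then max ans pb else ans
  if pb ≥ k then max ans1 pa else ans1

def pvLoop (N : Int) (M : Int) (k : Int) (a0 : Int) : Int :=
  (PySem.List.pyRange 1 (N + 1)).foldl (pvStep N M k) a0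

def solution (n : Int) (m : Int) (k : Int) : Int :=
  let total := n * m
  if total ≤ k then 0
  else if k = 0 then total
  else pvLoop m n k (pvLoop n m k 0)

-- ===== PORT B =====
-- largest remaining piece after cutting off the fewest rows of width M whose cells reach k; 0 if impossible
def pvPiece (N : Int) (M : Int) (k : Int) : Int :=
  if M ≤ 0 then 0
  else
    let cuts := max 0 (-(PySem.Int.floordiv (-k) M))  -- ceil(k/M), at least 0
    if cuts ≤ N then M * (N - cuts) else 0

def solution_alt (n : Int) (m : Int) (k : Int) : Int :=
  let total := n * m
  if total ≤ k then 0
  else if k = 0 then total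
  else max (max 0 (pvPiece n m k)) (pvPiece m n k)

-- ===== PRECONDITION & SPEC =====
def Spec_solution (n : Int) (m : Int) (k : Int) (out : Int) : Prop := out = solution_alt n m k
instance (n : Int) (m : Int) (k : Int) (out : Int) : Decidable (Spec_solution n m k out) := by unfold Spec_solution; infer_instance

-- ===== CLAIM (what is proved, stated in full; the proofs are below) =====
def Claim_equal_solution : Prop := ∀ (n : Int) (m : Int) (k : Int), Dom_solution n m k → Spec_solution n m k (solution n m k)

-- ===== LEMMAS AND PROOFS =====

theorem pvStep_le_self (N M k a i : Int) : a ≤ pvStep N M k a i := by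
  unfold pvStep
  dsimp only
  split_ifs <;> simp

theorem pvStep_ge1 (N M k a i : Int) (h : k ≤ M * i) : (N - i) * M ≤ pvStep N M k a i := by
  unfold pvStep
  dsimp only
  split_ifs with h1 <;> simp_all

theorem pvStep_ge2 (N M k a i : Int) (h : k ≤ (N - i) * M) : M * i ≤ pvStep N M k a i := by
  unfold pvStep
  dsimp only
  split_ifs with h1 h2 <;> simp_all

theorem pvStep_le (N M k a i B : Int) (hB : a ≤ B)
    (h1 : k ≤ M * i → (N - i) * M ≤ B) (h2 : k ≤ (N - i) * M → M * i ≤ B) :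
    pvStep N M k a i ≤ B := by
  unfold pvStep
  dsimp only
  split_ifs with g1 g2 <;> simp_all

theorem foldl_ge_init (N M k : Int) (L : List Int) (a0 : Int) :
    a0 ≤ L.foldl (pvStep N M k) a0 := by
  induction L generalizing a0 with
  | nil => simp
  | cons x t ih => exact le_trans (pvStep_le_self N M k a0 x) (ih _)

theorem foldl_ge_mem (N M k : Int) (L : List Int) (a0 i : Int) (hi : i ∈ L) :
    (k ≤ M * i → (N - i) * M ≤ L.foldl (pvStep N M k) a0) ∧
    (k ≤ (N - i) * M → M * i ≤ L.foldl (pvStep N M k) a0) := by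
  induction L generalizing a0 with
  | nil => simp at hi
  | cons x t ih =>
    rcases List.mem_cons.mp hi with h | h
    · subst h
      refine ⟨fun hc => ?_, fun hc => ?_⟩
      · exact le_trans (pvStep_ge1 N M k a0 i hc) (foldl_ge_init N M k t _)
      · exact le_trans (pvStep_ge2 N M k a0 i hc) (foldl_ge_init N M k t _)
    · exact ih _ h

theorem foldl_le (N M k : Int) (L : List Int) (a0 B : Int) (hB : a0 ≤ B)
    (h : ∀ i ∈ L, (k ≤ M * i → (N - i) * M ≤ B) ∧ (k ≤ (N - i) * M → M * i ≤ B)) :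
    L.foldl (pvStep N M k) a0 ≤ B := by
  induction L generalizing a0 with
  | nil => simpa using hB
  | cons x t ih =>
    have hx := h x (List.mem_cons_self)
    exact ih _ (pvStep_le N M k a0 x B hB hx.1 hx.2) (fun i hi => h i (List.mem_cons_of_mem _ hi))

theorem pvLoop_ge_init (N M k a0 : Int) : a0 ≤ pvLoop N M k a0 :=
  foldl_ge_init N M k _ a0

theorem pvLoop_ge (N M k a0 i : Int) (h1 : 1 ≤ i) (h2 : i ≤ N) :
    (k ≤ M * i → (N - i) * M ≤ pvLoop N M k a0) ∧
    (k ≤ (N - i) * M → M * i ≤ pvLoop N M k a0) := by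
  apply foldl_ge_mem
  rw [PySem.List.mem_pyRange_one]
  omega

theorem pvLoop_le (N M k a0 B : Int) (hB : a0 ≤ B)
    (h : ∀ i, 1 ≤ i → i ≤ N → (k ≤ M * i → (N - i) * M ≤ B) ∧ (k ≤ (N - i) * M → M * i ≤ B)) :
    pvLoop N M k a0 ≤ B := by
  apply foldl_le N M k _ a0 B hB
  intro i hi
  rw [PySem.List.mem_pyRange_one] at hi
  exact h i hi.1 (by omega)

-- bracket facts for the ceiling division used by pvPiece (M > 0)
theorem ceil_bracket (k M : Int) (hM : 0 < M) :
    (-(PySem.Int.floordiv (-k) M) - 1) * M < k ∧ k ≤ -(PySem.Int.floordiv (-k) M) * M :=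
  (PySem.Int.neg_floordiv_neg_eq_iff_of_pos hM).mp rfl

-- any feasible index j (0 ≤ j ≤ N, M*j ≥ k, M > 0) shows M*(N-j) ≤ pvPiece
theorem pvPiece_ub (k N M j : Int) (hM : 0 < M) (hj0 : 0 ≤ j) (hjN : j ≤ N) (hk : k ≤ M * j) :
    M * (N - j) ≤ pvPiece N M k := by
  obtain ⟨hb1, hb2⟩ := ceil_bracket k M hM
  set c := -(PySem.Int.floordiv (-k) M) with hc
  have hcj : c ≤ j := by nlinarith
  have hiN : max 0 c ≤ N := max_le (by omega) (by omega)
  unfold pvPiece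
  dsimp only
  rw [if_neg (by omega), if_pos hiN]
  have : max 0 c ≤ j := max_le hj0 hcj
  nlinarith

-- the value of pvPiece is ≤ 0 or realized by a candidate of A's loop
theorem pvPiece_mem (k N M : Int) :
    pvPiece N M k ≤ 0 ∨
      (∃ i, 1 ≤ i ∧ i ≤ N ∧ k ≤ M * i ∧ pvPiece N M k = M * (N - i)) ∨
      (k ≤ 0 ∧ 1 ≤ N ∧ pvPiece N M k = M * N) := by
  unfold pvPiece
  dsimp only
  split_ifs with h1 h2
  · left; exact le_refl 0
  · have hM : 0 < M := by omega
    obtain ⟨hb1, hb2⟩ := ceil_bracket k M hM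
    set c := -(PySem.Int.floordiv (-k) M) with hc
    rcases le_or_gt c 0 with hcle | hcpos
    · have hmax : max 0 c = 0 := by omega
      have hk0 : k ≤ 0 := by nlinarith
      rcases eq_or_lt_of_le (show (0:Int) ≤ N by omega) with hN0 | hN1
      · left; rw [hmax, ← hN0]; simp
      · right; right; exact ⟨hk0, by omega, by rw [hmax]; ring⟩
    · have hmax : max 0 c = c := by omega
      right; left
      exact ⟨c, by omega, by omega, by nlinarith, by rw [hmax]⟩
  · left; exact le_refl 0

theorem solution_spec_aux : ∀ (n m k : Int), solution n m k = solution_alt n m k := by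
  intro n m k
  unfold solution solution_alt
  dsimp only
  split_ifs with h1 h2
  · rfl
  · rfl
  · set r1 := pvLoop n m k 0 with hr1
    set r := pvLoop m n k r1 with hr
    have hr10 : (0:Int) ≤ r1 := pvLoop_ge_init n m k 0
    have hrr1 : r1 ≤ r := pvLoop_ge_init m n k r1
    have hr0 : (0:Int) ≤ r := le_trans hr10 hrr1
    set V := max (max 0 (pvPiece n m k)) (pvPiece m n k) with hV
    have hV0 : (0:Int) ≤ V := le_trans (le_max_left 0 _) (le_max_left _ _)
    have hVp1 : pvPiece n m k ≤ V := le_trans (le_max_right 0 _) (le_max_left _ _)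
    have hVp2 : pvPiece m n k ≤ V := le_max_right _ _
    -- candidates of A's loop over orientation (N,M) are bounded by V
    have hub : ∀ (N M : Int), pvPiece N M k ≤ V →
        ∀ i, 1 ≤ i → i ≤ N →
          (k ≤ M * i → (N - i) * M ≤ V) ∧ (k ≤ (N - i) * M → M * i ≤ V) := by
      intro N M hPV i hi1 hiN
      by_cases hM : 0 < M
      · constructor
        · intro hc
          have := pvPiece_ub k N M i hM (by omega) hiN hc
          nlinarith
        · intro hc
          have := pvPiece_ub k N M (N - i) hM (by omega) (by omega) (by nlinarith)
          have heq : M * (N - (N - i)) = M * i := by ring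
          rw [heq] at this
          omega
      · rw [not_lt] at hM
        constructor
        · intro _; nlinarith
        · intro _; nlinarith
    have hle : r ≤ V := by
      rw [hr]
      apply pvLoop_le m n k r1 V _ (hub m n hVp2)
      rw [hr1]
      exact pvLoop_le n m k 0 V hV0 (hub n m hVp1)
    -- each pvPiece value is bounded by r
    have hpr : ∀ (N M : Int),
        (∀ i, 1 ≤ i → i ≤ N →
          (k ≤ M * i → (N - i) * M ≤ r) ∧ (k ≤ (N - i) * M → M * i ≤ r)) →
        pvPiece N M k ≤ r := by
      intro N M hcand
      rcases pvPiece_mem k N M with hle0 | ⟨i, hi1, hiN, hik, hoi⟩ | ⟨hk0, hN1, hoN⟩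
      · omega
      · have := (hcand i hi1 hiN).1 hik
        rw [hoi]; linarith
      · have := (hcand N hN1 le_rfl).2 (by simpa using hk0)
        rw [hoN]; linarith
    have hcand1 : ∀ i, 1 ≤ i → i ≤ n →
        (k ≤ m * i → (n - i) * m ≤ r) ∧ (k ≤ (n - i) * m → m * i ≤ r) := by
      intro i hi1 hin
      obtain ⟨c1, c2⟩ := pvLoop_ge n m k 0 i hi1 hin
      exact ⟨fun h => le_trans (c1 h) hrr1, fun h => le_trans (c2 h) hrr1⟩
    have hcand2 : ∀ i, 1 ≤ i → i ≤ m →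
        (k ≤ n * i → (m - i) * n ≤ r) ∧ (k ≤ (m - i) * n → n * i ≤ r) :=
      fun i hi1 him => pvLoop_ge m n k r1 i hi1 him
    have hge : V ≤ r := by
      rw [hV]
      exact max_le (max_le hr0 (hpr n m hcand1)) (hpr m n hcand2)
    omega

-- ===== VERDICT (by name: the statement is the Claim_ definition above) =====
theorem solution_spec : Claim_equal_solution := by
  intro n m k _
  unfold Spec_solution
  exact solution_spec_aux n m k
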